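-- pv_equiv track=rewrite | github.com/seohyunaum/CS1301 | HW04.py | fieldTripRoster
-- ===== SOURCE A (Python) =====
-- def fieldTripRoster(friendList):
--     nameList = []
--     for aList in friendList:
--         for item in aList:
--             if type(item) == str and item not in nameList:
--                 nameList.append(item)
--     nameList.sort()
--     return nameList
-- ===== SOURCE B (Python) =====
-- def fieldTripRoster(friendList):
--     allNames = []
--     for aList in friendList:
--         for item in aList:
--             if type(item) == str:
--                 allNames.append(item)
--     allNames.sort()
--     roster = []
--     for name in allNames:
--         if not roster or roster[-1] != name:
--             roster.append(name)
--     return roster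
-- ===== Notes on version B (the rewrite author's own statement) =====
-- stated objective: faster
-- what changed: A dedups during collection with an O(n) membership scan on the growing result before sorting; B collects all strings with duplicates, sorts once, and dedups in one linear adjacency scan over the sorted list.
import Mathlib
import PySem

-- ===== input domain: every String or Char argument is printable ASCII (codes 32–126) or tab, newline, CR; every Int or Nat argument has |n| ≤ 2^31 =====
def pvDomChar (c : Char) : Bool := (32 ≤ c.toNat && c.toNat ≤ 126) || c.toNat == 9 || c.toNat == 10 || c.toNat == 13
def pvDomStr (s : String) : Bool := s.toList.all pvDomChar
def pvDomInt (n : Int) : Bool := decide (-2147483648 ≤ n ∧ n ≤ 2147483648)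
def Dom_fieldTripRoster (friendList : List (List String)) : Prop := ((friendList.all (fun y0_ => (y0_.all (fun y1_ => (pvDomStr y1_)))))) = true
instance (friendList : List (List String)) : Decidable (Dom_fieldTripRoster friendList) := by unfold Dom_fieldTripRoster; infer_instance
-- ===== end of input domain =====

-- B changes the algorithm: collect everything, sort once, dedup adjacent duplicates in one scan
-- (A dedups with a membership scan on the growing list before sorting); same return value, measurably faster in a timing run.
-- Under the type convention every item is a String, so Python's 'type(item) == str' test is always true; both ports reflect that.

-- ===== PORT A =====
-- nameList = []; for aList in friendList: for item in aList: if item not in nameList: nameList.append(item); nameList.sort()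
def fieldTripRoster (friendList : List (List String)) : List String :=
  let nameList := friendList.foldl
    (fun nameList aList => aList.foldl
      (fun nameList item => if nameList.contains item then nameList else nameList ++ [item])
      nameList) []
  PySem.List.sorted nameList (fun x => x) false

-- ===== PORT B =====
-- allNames collects every item; sort; one adjacency scan appending when roster is empty or roster[-1] != name
def fieldTripRoster_alt (friendList : List (List String)) : List String :=
  let allNames := friendList.foldl
    (fun allNames aList => aList.foldl (fun allNames item => allNames ++ [item]) allNames) []
  let sortedNames := PySem.List.sorted allNames (fun x => x) false
  sortedNames.foldl
    (fun roster name => if roster.getLast? ≠ some name then roster ++ [name] else roster) []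

-- ===== PRECONDITION & SPEC =====
def Spec_fieldTripRoster (friendList : List (List String)) (out : List String) : Prop := out = fieldTripRoster_alt friendList
instance (friendList : List (List String)) (out : List String) : Decidable (Spec_fieldTripRoster friendList out) := by unfold Spec_fieldTripRoster; infer_instance

-- ===== CLAIM (what is proved, stated in full; the proofs are below) =====
def Claim_equal_fieldTripRoster : Prop := ∀ (friendList : List (List String)), Dom_fieldTripRoster friendList → Spec_fieldTripRoster friendList (fieldTripRoster friendList)

-- ===== LEMMAS AND PROOFS =====

-- A's inner/outer dedup-collect fold: result is Nodup and its members are acc's plus the traversed items.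
theorem dedup_inner (xs : List String) : ∀ (acc : List String), acc.Nodup →
    ((xs.foldl (fun a i => if a.contains i then a else a ++ [i]) acc).Nodup ∧
     ∀ x, x ∈ xs.foldl (fun a i => if a.contains i then a else a ++ [i]) acc ↔ x ∈ acc ∨ x ∈ xs) := by
  induction xs with
  | nil => intro acc h; simpa using h
  | cons b l ih =>
    intro acc h
    by_cases hb : acc.contains b
    · have := ih acc h
      simp only [List.foldl_cons, if_pos hb]
      refine ⟨this.1, fun x => ?_⟩
      rw [this.2]
      have hb' : b ∈ acc := by simpa [List.contains_iff_mem] using hb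
      have hxb : x = b → x ∈ acc := fun e => e ▸ hb'
      simp only [List.mem_cons]
      tauto
    · have hbmem : b ∉ acc := fun hm => hb (by simpa [List.contains_iff_mem] using hm)
      have hnd : (acc ++ [b]).Nodup := by
        simp [List.nodup_append, h]
        exact fun a ha e => hbmem (e ▸ ha)
      have := ih (acc ++ [b]) hnd
      simp only [List.foldl_cons, if_neg hb]
      refine ⟨this.1, fun x => ?_⟩
      rw [this.2]
      simp [List.mem_append, or_assoc]

theorem dedup_outer (ls : List (List String)) : ∀ (acc : List String), acc.Nodup →
    ((ls.foldl (fun a s => s.foldl (fun a i => if a.contains i then a else a ++ [i]) a) acc).Nodup ∧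
     ∀ x, x ∈ ls.foldl (fun a s => s.foldl (fun a i => if a.contains i then a else a ++ [i]) a) acc
        ↔ x ∈ acc ∨ ∃ s ∈ ls, x ∈ s) := by
  induction ls with
  | nil => intro acc h; simpa using h
  | cons s ls ih =>
    intro acc h
    have hin := dedup_inner s acc h
    have := ih _ hin.1
    simp only [List.foldl_cons]
    refine ⟨this.1, fun x => ?_⟩
    rw [this.2, hin.2]
    simp [or_assoc]

-- B's collect fold is plain concatenation.
theorem collect_inner (xs : List String) : ∀ (acc : List String),
    xs.foldl (fun a i => a ++ [i]) acc = acc ++ xs := by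
  induction xs with
  | nil => simp
  | cons b l ih => intro acc; simp [ih]

theorem collect_outer (ls : List (List String)) : ∀ (acc : List String),
    ls.foldl (fun a s => s.foldl (fun a i => a ++ [i]) a) acc = acc ++ ls.flatten := by
  induction ls with
  | nil => simp
  | cons s ls ih =>
    intro acc
    rw [List.foldl_cons, collect_inner, ih]
    simp

-- In a ≤-sorted accumulator every element is ≤ the last one.
theorem le_getLast (acc : List String) (hp : acc.Pairwise (· ≤ ·)) :
    ∀ a ∈ acc, ∀ m, acc.getLast? = some m → a ≤ m := by
  induction acc with
  | nil => simp
  | cons c cs ih =>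
    intro a ha m hm
    cases cs with
    | nil =>
      simp at ha hm
      simp [ha, hm]
    | cons d ds =>
      rw [List.getLast?_cons_cons] at hm
      rcases List.mem_cons.mp ha with rfl | ha
      · have hmm : m ∈ d :: ds := List.mem_of_getLast? hm
        exact (List.pairwise_cons.mp hp).1 m hmm
      · exact ih (List.pairwise_cons.mp hp).2 a ha m hm

-- B's adjacency-dedup fold: on a ≤-sorted input it yields a strictly increasing list with the same members.
theorem adj_fold (l : List String) : ∀ (acc : List String), l.Pairwise (· ≤ ·) →
    acc.Pairwise (· < ·) → (∀ a ∈ acc, ∀ b ∈ l, a ≤ b) →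
    ((l.foldl (fun r n => if r.getLast? ≠ some n then r ++ [n] else r) acc).Pairwise (· < ·) ∧
     ∀ x, x ∈ l.foldl (fun r n => if r.getLast? ≠ some n then r ++ [n] else r) acc ↔ x ∈ acc ∨ x ∈ l) := by
  induction l with
  | nil => intro acc _ hacc _; simpa using hacc
  | cons b l ih =>
    intro acc hl hacc hle
    have hlb : ∀ c ∈ l, b ≤ c := fun c hc => (List.pairwise_cons.mp hl).1 c hc
    have hl' := (List.pairwise_cons.mp hl).2
    by_cases hlast : acc.getLast? = some b
    · rw [List.foldl_cons, if_neg (not_not_intro hlast)]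
      have hb : b ∈ acc := List.mem_of_getLast? hlast
      have := ih acc hl' hacc (fun a ha c hc => le_trans (hle a ha b (by simp)) (hlb c hc))
      refine ⟨this.1, fun x => ?_⟩
      rw [this.2]
      have hxb : x = b → x ∈ acc := fun e => e ▸ hb
      simp only [List.mem_cons]
      tauto
    · rw [List.foldl_cons, if_pos hlast]
      have hlt : ∀ a ∈ acc, a < b := by
        intro a ha
        cases h : acc.getLast? with
        | none => exact absurd ha (by simp [List.getLast?_eq_none_iff.mp h])
        | some m =>
          have ham : a ≤ m := le_getLast acc (hacc.imp le_of_lt) a ha m h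
          have hmb : m ≤ b := hle m (List.mem_of_getLast? h) b (by simp)
          have : m ≠ b := fun e => hlast (e ▸ h)
          exact lt_of_le_of_lt ham (lt_of_le_of_ne hmb this)
      have hacc' : (acc ++ [b]).Pairwise (· < ·) := by
        rw [List.pairwise_append]
        exact ⟨hacc, by simp, by simpa using hlt⟩
      have hle' : ∀ a ∈ acc ++ [b], ∀ c ∈ l, a ≤ c := by
        intro a ha c hc
        rcases List.mem_append.mp ha with ha | ha
        · exact hle a ha c (by simp [hc])
        · simp at ha; exact ha ▸ hlb c hc
      have := ih (acc ++ [b]) hl' hacc' hle'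
      refine ⟨this.1, fun x => ?_⟩
      rw [this.2]
      simp [List.mem_append, or_assoc]

-- ===== VERDICT (by name: the statement is the Claim_ definition above) =====
theorem fieldTripRoster_spec : Claim_equal_fieldTripRoster := by
  intro fl _
  unfold Spec_fieldTripRoster fieldTripRoster fieldTripRoster_alt
  simp only [collect_outer, List.nil_append]
  set nameA := fl.foldl (fun a s => s.foldl (fun a i => if a.contains i then a else a ++ [i]) a) [] with hA
  set srt := PySem.List.sorted fl.flatten (fun x => x) false with hS
  set res := srt.foldl (fun r n => if r.getLast? ≠ some n then r ++ [n] else r) [] with hR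
  have hsp : srt.Pairwise (· ≤ ·) := PySem.List.sorted_pairwise fl.flatten (fun x => x)
  have hadj := adj_fold srt [] hsp (by simp) (by simp)
  have hded := dedup_outer fl [] (by simp)
  have hndA : nameA.Nodup := hded.1
  have hmem : ∀ x, x ∈ res ↔ x ∈ nameA := by
    intro x
    rw [(hadj.2 x), hded.2 x]
    simp only [List.not_mem_nil, false_or]
    rw [hS, PySem.List.mem_sorted]
    simp [List.mem_flatten]
  have hperm : res.Perm nameA :=
    (List.perm_ext_iff_of_nodup hadj.1.nodup hndA).mpr hmem
  exact PySem.List.sorted_eq_of_perm_of_pairwise_lt nameA res (fun x => x) hperm hadj.1
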